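-- pv_equiv track=rewrite | github.com/nayoung240/algorithm | functiondevlop.py | solution
-- ===== SOURCE A (Python) =====
-- import math
-- from collections import deque
-- import copy
--
-- def solution(progresses, speeds):
--     answer = []
--     workday = deque()
--     remain = [100-i for i in progresses]
--
--     for i, j in zip(remain, speeds):
--         workday.append(math.ceil(i/j))
--
--     while len(workday) > 0:
--         minday = workday.popleft()
--         cnt = 1
--
--         for i in copy.deepcopy(workday):
--             if minday >= i:
--                 workday.popleft()
--                 cnt += 1
--             else:
--                 break
--
--         answer.append(cnt)
--
--     return answer
-- ===== SOURCE B (Python) =====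
-- def solution(progresses, speeds):
--     days = [-((p - 100) // s) for p, s in zip(progresses, speeds)]
--     answer = []
--     leader = None
--     cnt = 0
--     for d in days:
--         if leader is None or d > leader:
--             if cnt:
--                 answer.append(cnt)
--             leader = d
--             cnt = 1
--         else:
--             cnt += 1
--     if cnt:
--         answer.append(cnt)
--     return answer
-- ===== Notes on version B (the rewrite author's own statement) =====
-- stated objective: faster
-- what changed: Replaced the deque-with-deepcopy grouping loop (deepcopying the whole remaining deque on every group) by a single left-to-right pass tracking the current group's leading finish day and a counter, with integer ceiling division instead of float ceil.
import Mathlib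
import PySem

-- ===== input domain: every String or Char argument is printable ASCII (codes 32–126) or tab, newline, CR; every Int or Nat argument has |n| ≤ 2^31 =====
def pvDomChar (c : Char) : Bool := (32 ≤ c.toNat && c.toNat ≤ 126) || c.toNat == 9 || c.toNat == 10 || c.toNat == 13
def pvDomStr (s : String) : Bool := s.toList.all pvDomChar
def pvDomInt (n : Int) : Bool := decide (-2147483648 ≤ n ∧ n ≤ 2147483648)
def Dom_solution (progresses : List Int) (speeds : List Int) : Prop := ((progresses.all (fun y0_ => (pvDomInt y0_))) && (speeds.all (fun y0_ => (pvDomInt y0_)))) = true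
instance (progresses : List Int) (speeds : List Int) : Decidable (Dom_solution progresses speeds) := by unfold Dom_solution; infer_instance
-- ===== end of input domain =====

-- ===== PORT A =====
-- B is a single O(n) pass instead of A's deque loop that deepcopies the remainder per group.
-- math.ceil(i/j) is ported as exact integer ceiling division -((-i)//j): for |i|,|j| ≤ 2^31+100
-- the double quotient i/j is within half an ulp of the rational value, so its ceil is exact.

-- inner for-loop of A: pops the leading run of days ≤ minday, counting (cnt accumulates)
def innerA (m : Int) : List Int → Int → Int × List Int
  | [], cnt => (cnt, [])
  | i :: t, cnt => if m ≥ i then innerA m t (cnt + 1) else (cnt, i :: t)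

theorem innerA_len (m : Int) : ∀ (xs : List Int) (c : Int), (innerA m xs c).2.length ≤ xs.length
  | [], _ => Nat.le_refl _
  | i :: t, c => by
    unfold innerA
    split
    · exact Nat.le_trans (innerA_len m t (c + 1)) (Nat.le_succ _)
    · exact Nat.le_refl _

-- A's while loop over the deque
def whileA (w : List Int) : List Int :=
  match w with
  | [] => []
  | m :: rest =>
    let p := innerA m rest 1
    p.1 :: whileA p.2
termination_by w.length
decreasing_by
  exact Nat.lt_succ_of_le (innerA_len m rest 1)

def solution (progresses : List Int) (speeds : List Int) : List Int :=
  let remain := progresses.map (fun i => 100 - i)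
  let workday := List.zipWith (fun i j => -(PySem.Int.floordiv (-i) j)) remain speeds
  whileA workday

-- ===== PORT B =====
-- Source B's for loop: state (leader?, cnt, answer); final flush appends cnt if nonzero
def loopB : Option Int → Int → List Int → List Int → List Int
  | _, cnt, answer, [] => answer ++ (if cnt ≠ 0 then [cnt] else [])
  | none, cnt, answer, d :: ds =>
      loopB (some d) 1 (answer ++ (if cnt ≠ 0 then [cnt] else [])) ds
  | some m, cnt, answer, d :: ds =>
    if d > m then
      loopB (some d) 1 (answer ++ (if cnt ≠ 0 then [cnt] else [])) ds
    else
      loopB (some m) (cnt + 1) answer ds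

def solution_alt (progresses : List Int) (speeds : List Int) : List Int :=
  let days := List.zipWith (fun p s => -(PySem.Int.floordiv (p - 100) s)) progresses speeds
  loopB none 0 [] days

-- ===== PRECONDITION & SPEC =====
-- Pre_: A raises ZeroDivisionError when a speed actually paired by zip is 0; exactly those inputs are excluded.
def Pre_solution (progresses : List Int) (speeds : List Int) : Prop :=
  ∀ s ∈ speeds.take progresses.length, s ≠ 0
instance (progresses : List Int) (speeds : List Int) : Decidable (Pre_solution progresses speeds) := by unfold Pre_solution; infer_instance
def pvWitness_solution : List Int × List Int := ([93, 30, 55], [1, 30, 5])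

def Spec_solution (progresses : List Int) (speeds : List Int) (out : List Int) : Prop := out = solution_alt progresses speeds
instance (progresses : List Int) (speeds : List Int) (out : List Int) : Decidable (Spec_solution progresses speeds out) := by unfold Spec_solution; infer_instance

-- ===== CLAIM (what is proved, stated in full; the proofs are below) =====
def Claim_equal_solution : Prop := ∀ (progresses : List Int) (speeds : List Int), Dom_solution progresses speeds → Pre_solution progresses speeds → Spec_solution progresses speeds (solution progresses speeds)

-- ===== LEMMAS AND PROOFS =====

-- core invariant: B's loop in a started group (leader m, count c ≥ 1) produces
-- exactly A's split of the remaining days at leader m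
theorem loopB_eq_innerA (xs : List Int) : ∀ (m c : Int) (acc : List Int), 1 ≤ c →
    loopB (some m) c acc xs = acc ++ (innerA m xs c).1 :: whileA (innerA m xs c).2 := by
  induction xs with
  | nil =>
    intro m c acc hc
    simp [loopB, innerA, whileA, show c ≠ 0 by omega]
  | cons d ds ih =>
    intro m c acc hc
    by_cases h : d > m
    · have hnle : ¬ m ≥ d := by omega
      simp only [loopB, innerA, hnle, if_pos h, ite_false]
      rw [ih d 1 (acc ++ (if c ≠ 0 then [c] else [])) (le_refl 1)]
      simp [show c ≠ 0 by omega, whileA]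
    · have hle : m ≥ d := by omega
      simp only [loopB, innerA, if_pos hle, if_neg h]
      exact ih m (c + 1) acc (by omega)

theorem loopB_eq_whileA (xs : List Int) : loopB none 0 [] xs = whileA xs := by
  cases xs with
  | nil => simp [loopB, whileA]
  | cons d ds =>
    simp only [loopB, whileA]
    rw [loopB_eq_innerA ds d 1 _ (le_refl 1)]
    simp

theorem days_eq (progresses speeds : List Int) :
    List.zipWith (fun i j => -(PySem.Int.floordiv (-i) j)) (progresses.map (fun i => 100 - i)) speeds
      = List.zipWith (fun p s => -(PySem.Int.floordiv (p - 100) s)) progresses speeds := by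
  induction progresses generalizing speeds with
  | nil => simp
  | cons p ps ih =>
    cases speeds with
    | nil => simp
    | cons s ss =>
      simp only [List.map, List.zipWith]
      rw [ih ss]
      norm_num

-- ===== VERDICT (by name: the statement is the Claim_ definition above) =====
theorem solution_spec : Claim_equal_solution := by
  intro progresses speeds _ _
  unfold Spec_solution solution solution_alt
  show whileA _ = loopB none 0 [] _
  rw [days_eq, loopB_eq_whileA]
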